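-- pv_equiv track=rewrite | github.com/AlexMontillae/AdventCode2023 | day4.py | points_of_wins
-- ===== SOURCE A (Python) =====
-- def points_of_wins(numbers: list[int], winners: list[int], card: int) -> list:
--     total = []
--     aux = card
--
--     for elem in numbers:
--         if elem in set(winners):
--             total.append(aux + 1)
--             aux += 1
--
--     return total
-- ===== SOURCE B (Python) =====
-- def points_of_wins(numbers: list[int], winners: list[int], card: int) -> list:
--     wins = set(winners)
--     count = sum(1 for x in numbers if x in wins)
--     return list(range(card + 1, card + count + 1))
-- ===== Notes on version B (the rewrite author's own statement) =====
-- stated objective: faster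
-- what changed: A rebuilds set(winners) for every element and grows the list with a running accumulator; B builds the winner set once, counts matches in one pass, and returns the closed-form list(range(card+1, card+count+1)).
import Mathlib
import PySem

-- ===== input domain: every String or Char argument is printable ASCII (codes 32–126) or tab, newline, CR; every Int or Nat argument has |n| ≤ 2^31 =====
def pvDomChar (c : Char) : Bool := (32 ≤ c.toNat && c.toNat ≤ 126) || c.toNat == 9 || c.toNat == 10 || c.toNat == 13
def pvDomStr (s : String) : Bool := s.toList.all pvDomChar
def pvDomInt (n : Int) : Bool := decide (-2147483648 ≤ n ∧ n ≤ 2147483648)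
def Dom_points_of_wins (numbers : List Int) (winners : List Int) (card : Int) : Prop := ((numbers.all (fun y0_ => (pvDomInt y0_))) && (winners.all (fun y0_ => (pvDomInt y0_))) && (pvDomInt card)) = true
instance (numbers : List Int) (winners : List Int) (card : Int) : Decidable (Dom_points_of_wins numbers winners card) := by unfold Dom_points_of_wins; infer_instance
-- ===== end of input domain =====

-- B replaces A's per-element set(winners) membership loop with one winner set, a single match count,
-- and a closed-form range(card+1, card+count+1); a timing run measured B faster.

-- ===== PORT A =====
-- for-loop over numbers with state (total, aux); 'elem in set(winners)' per iteration
def points_of_wins (numbers : List Int) (winners : List Int) (card : Int) : List Int :=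
  (numbers.foldl
    (fun (st : List Int × Int) elem =>
      if decide (elem ∈ PySem.Set.ofList winners) then (st.1 ++ [st.2 + 1], st.2 + 1) else st)
    ([], card)).1

-- ===== PORT B =====
def points_of_wins_alt (numbers : List Int) (winners : List Int) (card : Int) : List Int :=
  let wins := PySem.Set.ofList winners
  let count : Int := (numbers.map (fun x => if decide (x ∈ wins) then (1 : Int) else 0)).sum
  PySem.List.pyRange (card + 1) (card + count + 1) 1

-- ===== PRECONDITION & SPEC =====
def Spec_points_of_wins (numbers : List Int) (winners : List Int) (card : Int) (out : List Int) : Prop := out = points_of_wins_alt numbers winners card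
instance (numbers : List Int) (winners : List Int) (card : Int) (out : List Int) : Decidable (Spec_points_of_wins numbers winners card out) := by unfold Spec_points_of_wins; infer_instance

-- ===== CLAIM (what is proved, stated in full; the proofs are below) =====
def Claim_equal_points_of_wins : Prop := ∀ (numbers : List Int) (winners : List Int) (card : Int), Dom_points_of_wins numbers winners card → Spec_points_of_wins numbers winners card (points_of_wins numbers winners card)

-- ===== LEMMAS AND PROOFS =====

-- loop invariant for A's fold: it appends aux+1, …, aux+c where c is the number of matches
theorem points_loop_eq (p : Int → Bool) (numbers : List Int) :
    ∀ (acc : List Int) (aux : Int),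
    (numbers.foldl
      (fun (st : List Int × Int) elem =>
        if p elem then (st.1 ++ [st.2 + 1], st.2 + 1) else st)
      (acc, aux)).1
    = acc ++ PySem.List.pyRange (aux + 1) (aux + (numbers.countP p : Int) + 1) 1 := by
  induction numbers with
  | nil =>
    intro acc aux
    simp
  | cons y ys ih =>
    intro acc aux
    simp only [List.foldl_cons, List.countP_cons]
    by_cases h : p y
    · simp only [h, if_true]
      rw [ih]
      have hc : (0 : Int) ≤ (ys.countP p : Int) := Int.natCast_nonneg _
      have hlt : aux + 1 < aux + 1 + (ys.countP p : Int) + 1 := by omega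
      have hb : aux + ((ys.countP p + 1 : Nat) : Int) + 1 = aux + 1 + (ys.countP p : Int) + 1 := by
        push_cast; ring
      rw [hb]
      conv_rhs => rw [PySem.List.pyRange_one_cons hlt]
      simp
    · rw [if_neg h, ih]
      simp [h]

-- B's 0/1-sum is the match count
theorem sum_ite_eq_countP (p : Int → Bool) (numbers : List Int) :
    (numbers.map (fun x => if p x then (1 : Int) else 0)).sum = (numbers.countP p : Int) := by
  induction numbers with
  | nil => simp
  | cons y ys ih =>
    simp only [List.map_cons, List.sum_cons, List.countP_cons, ih]
    by_cases h : p y <;> simp [h] <;> push_cast <;> ring_nf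

-- ===== VERDICT (by name: the statement is the Claim_ definition above) =====
theorem points_of_wins_spec : Claim_equal_points_of_wins := by
  intro numbers winners card _
  unfold Spec_points_of_wins points_of_wins points_of_wins_alt
  rw [points_loop_eq]
  simp only [List.nil_append, sum_ite_eq_countP]
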